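-- pv_equiv track=rewrite | github.com/Shai2u/ticktick_gtd_helper | scripts/ticktick_playground.py | apply_task_filters
-- ===== SOURCE A (Python) =====
-- from typing import Any
--
-- def has_no_project(task: dict[str, Any]) -> bool:
--     value = task.get("projectId")
--     return value in (None, "")
--
-- def has_no_parent(task: dict[str, Any]) -> bool:
--     value = task.get("parentId")
--     return value in (None, "")
--
-- def apply_task_filters(
--     tasks: list[dict[str, Any]],
--     only_no_project: bool,
--     only_inbox_heuristic: bool,
--     only_no_parent: bool,
-- ) -> list[dict[str, Any]]:
--     filtered = tasks
--
--     if only_no_project: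
--         filtered = [t for t in filtered if has_no_project(t)]
--
--     if only_inbox_heuristic:
--         filtered = [
--             t
--             for t in filtered
--             if has_no_project(t) or str(t.get("projectId", "")).startswith("inbox")
--         ]
--
--     if only_no_parent:
--         filtered = [t for t in filtered if has_no_parent(t)]
--
--     return filtered
-- ===== SOURCE B (Python) =====
-- def has_no_project(task):
--     value = task.get("projectId")
--     return value in (None, "")
--
-- def has_no_parent(task):
--     value = task.get("parentId")
--     return value in (None, "")
--
-- def _keep(t, only_no_project, only_inbox_heuristic, only_no_parent):
--     if only_no_project and not has_no_project(t):
--         return False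
--     if only_inbox_heuristic and not (
--         has_no_project(t) or str(t.get("projectId", "")).startswith("inbox")
--     ):
--         return False
--     if only_no_parent and not has_no_parent(t):
--         return False
--     return True
--
-- def apply_task_filters(tasks, only_no_project, only_inbox_heuristic, only_no_parent):
--     return [
--         t
--         for t in tasks
--         if _keep(t, only_no_project, only_inbox_heuristic, only_no_parent)
--     ]
-- ===== Notes on version B (the rewrite author's own statement) =====
-- stated objective: simpler
-- what changed: Replaces A's three sequential list-rebuilding passes (one intermediate list per enabled flag) with a single pass over tasks using one combined per-task predicate that short-circuits on the first failing enabled filter.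
import Mathlib
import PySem

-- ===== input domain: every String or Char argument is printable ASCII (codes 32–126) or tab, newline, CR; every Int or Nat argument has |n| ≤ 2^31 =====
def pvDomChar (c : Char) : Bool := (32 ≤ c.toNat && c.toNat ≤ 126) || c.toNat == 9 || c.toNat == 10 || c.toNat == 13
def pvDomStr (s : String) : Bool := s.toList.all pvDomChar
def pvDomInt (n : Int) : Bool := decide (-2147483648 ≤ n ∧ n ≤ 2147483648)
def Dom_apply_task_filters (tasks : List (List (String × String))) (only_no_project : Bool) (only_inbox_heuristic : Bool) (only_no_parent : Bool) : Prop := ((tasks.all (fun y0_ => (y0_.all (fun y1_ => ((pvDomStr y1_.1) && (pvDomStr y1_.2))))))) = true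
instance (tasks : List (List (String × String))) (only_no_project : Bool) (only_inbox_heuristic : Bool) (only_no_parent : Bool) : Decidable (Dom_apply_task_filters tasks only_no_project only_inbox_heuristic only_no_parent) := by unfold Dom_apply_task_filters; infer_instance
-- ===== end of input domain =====

-- B fuses A's three sequential filter passes into a single pass with one combined short-circuiting per-task predicate (objective: simpler).
-- ===== PORT A =====
-- value = task.get("projectId"); return value in (None, "")
def has_no_project (task : List (String × String)) : Bool :=
  match PySem.Dict.get? ⟨task⟩ "projectId" with
  | none => true
  | some v => v == ""

def has_no_parent (task : List (String × String)) : Bool :=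
  match PySem.Dict.get? ⟨task⟩ "parentId" with
  | none => true
  | some v => v == ""

def apply_task_filters (tasks : List (List (String × String))) (only_no_project : Bool) (only_inbox_heuristic : Bool) (only_no_parent : Bool) : List (List (String × String)) :=
  let filtered := tasks
  let filtered := if only_no_project then filtered.filter (fun t => has_no_project t) else filtered
  let filtered := if only_inbox_heuristic then
      filtered.filter (fun t => has_no_project t || PySem.Str.startswith (PySem.Dict.getD ⟨t⟩ "projectId" "") "inbox")
    else filtered
  let filtered := if only_no_parent then filtered.filter (fun t => has_no_parent t) else filtered
  filtered

-- ===== PORT B =====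
def pvKeep (t : List (String × String)) (only_no_project : Bool) (only_inbox_heuristic : Bool) (only_no_parent : Bool) : Bool :=
  if only_no_project && !(has_no_project t) then false
  else if only_inbox_heuristic && !(has_no_project t || PySem.Str.startswith (PySem.Dict.getD ⟨t⟩ "projectId" "") "inbox") then false
  else if only_no_parent && !(has_no_parent t) then false
  else true

def apply_task_filters_alt (tasks : List (List (String × String))) (only_no_project : Bool) (only_inbox_heuristic : Bool) (only_no_parent : Bool) : List (List (String × String)) :=
  tasks.filter (fun t => pvKeep t only_no_project only_inbox_heuristic only_no_parent)

-- ===== PRECONDITION & SPEC =====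
def Spec_apply_task_filters (tasks : List (List (String × String))) (only_no_project : Bool) (only_inbox_heuristic : Bool) (only_no_parent : Bool) (out : List (List (String × String))) : Prop := out = apply_task_filters_alt tasks only_no_project only_inbox_heuristic only_no_parent
instance (tasks : List (List (String × String))) (only_no_project : Bool) (only_inbox_heuristic : Bool) (only_no_parent : Bool) (out : List (List (String × String))) : Decidable (Spec_apply_task_filters tasks only_no_project only_inbox_heuristic only_no_parent out) := by unfold Spec_apply_task_filters; infer_instance

-- ===== CLAIM (what is proved, stated in full; the proofs are below) =====
def Claim_equal_apply_task_filters : Prop := ∀ (tasks : List (List (String × String))) (only_no_project : Bool) (only_inbox_heuristic : Bool) (only_no_parent : Bool), Dom_apply_task_filters tasks only_no_project only_inbox_heuristic only_no_parent → Spec_apply_task_filters tasks only_no_project only_inbox_heuristic only_no_parent (apply_task_filters tasks only_no_project only_inbox_heuristic only_no_parent)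

-- ===== LEMMAS AND PROOFS =====

-- ===== VERDICT (by name: the statement is the Claim_ definition above) =====
theorem apply_task_filters_spec : Claim_equal_apply_task_filters := by
  intro tasks onp oih onpar _
  show apply_task_filters tasks onp oih onpar = apply_task_filters_alt tasks onp oih onpar
  unfold apply_task_filters apply_task_filters_alt
  cases onp <;> cases oih <;> cases onpar <;>
    simp only [if_true, if_false, List.filter_filter, Bool.false_eq_true] <;>
    first
      | exact ((List.filter_eq_self).2 fun x _ => by simp [pvKeep]).symm
      | · refine List.filter_congr fun x _ => ?_
          simp only [pvKeep]
          cases h1 : has_no_project x <;> cases h2 : has_no_parent x <;>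
            cases h3 : PySem.Str.startswith (PySem.Dict.getD ⟨x⟩ "projectId" "") "inbox" <;>
            simp [h1, h2, h3]
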